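-- pv_equiv track=rewrite | github.com/dohun31/algorithm | week_16/211103/N개의최소공배수.py | find_div
-- ===== SOURCE A (Python) =====
-- def find_div(arr, primes):
--     possible = 0
--     for prime in primes:
--         cnt = 0
--         for idx, number in enumerate(arr):
--             if number % prime != 0: continue
--             else:
--                 cnt += 1
--                 number = number // prime
--             arr[idx] = number
--         if cnt != 0:
--             possible = prime
--             break
--     return possible, arr
-- ===== SOURCE B (Python) =====
-- def find_div(arr, primes):
--     # Transposed traversal: one pass over arr, keeping the argmin index of the
--     # first usable divisor in primes (inner scan shrinks to the current best).
--     best = len(primes)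
--     for n in arr:
--         for i in range(best):
--             p = primes[i]
--             if p and n % p == 0:
--                 best = i
--                 break
--     if best == len(primes):
--         return 0, arr
--     prime = primes[best]
--     for i, n in enumerate(arr):
--         if n % prime == 0:
--             arr[i] = n // prime
--     return prime, arr
-- ===== Notes on version B (the rewrite author's own statement) =====
-- stated objective: alternative
-- what changed: The loop nest is transposed: instead of A's outer loop over primes that rewrites the array per prime, B makes one pass over arr computing the argmin index of each element's first usable (nonzero) divisor in primes with a shrinking inner bound, then applies the division in a single final pass.
import Mathlib
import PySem

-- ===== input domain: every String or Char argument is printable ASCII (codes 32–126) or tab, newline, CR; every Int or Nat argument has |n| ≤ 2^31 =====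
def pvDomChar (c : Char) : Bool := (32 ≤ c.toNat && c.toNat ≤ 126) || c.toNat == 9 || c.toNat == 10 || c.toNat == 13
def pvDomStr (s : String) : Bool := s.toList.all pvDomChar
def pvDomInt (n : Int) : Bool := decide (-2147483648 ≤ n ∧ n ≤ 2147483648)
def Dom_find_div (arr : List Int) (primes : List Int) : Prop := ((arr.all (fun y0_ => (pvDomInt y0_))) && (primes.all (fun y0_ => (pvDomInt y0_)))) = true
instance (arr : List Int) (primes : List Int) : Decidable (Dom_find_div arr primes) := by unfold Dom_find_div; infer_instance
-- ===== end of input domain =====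

-- B transposes A's loop nest: one pass over arr tracking the argmin index of each element's
-- first usable divisor in primes, then a single division pass (objective: alternative).
-- Both Pythons mutate arr in place identically; equivalence here is about the returned value.

-- ===== PORT A =====
-- inner 'for idx, number in enumerate(arr)' loop: counts divisible elements and rewrites arr
def pvStepA (p : Int) (acc : Int × List Int) (number : Int) : Int × List Int :=
  if PySem.Int.mod number p ≠ 0 then (acc.1, acc.2 ++ [number])
  else (acc.1 + 1, acc.2 ++ [PySem.Int.floordiv number p])

def pvInnerA (p : Int) (arr : List Int) : Int × List Int :=
  arr.foldl (pvStepA p) (0, [])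

def find_div (arr : List Int) (primes : List Int) : Int × List Int :=
  match primes with
  | [] => (0, arr)
  | p :: ps =>
    let r := pvInnerA p arr
    if r.1 ≠ 0 then (p, r.2) else find_div r.2 ps

-- ===== PORT B =====
-- 'for i in range(best): p = primes[i]; if p and n % p == 0: best = i; break'
-- (i counts up, cut off at best; indices scanned are always in range, so the list recursion
--  walks primes directly — exact for Python's primes[i] on 0 ≤ i < best ≤ len(primes))
def pvScanB (n : Int) (rest : List Int) (i best : Nat) : Nat :=
  match rest with
  | [] => best
  | p :: ps =>
    if i ≥ best then best
    else if p ≠ 0 ∧ PySem.Int.mod n p = 0 then i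
    else pvScanB n ps (i + 1) best

def find_div_alt (arr : List Int) (primes : List Int) : Int × List Int :=
  let best := arr.foldl (fun b n => pvScanB n primes 0 b) primes.length
  if best = primes.length then (0, arr)
  else
    let prime := primes.getD best 0
    (prime, arr.map (fun n => if PySem.Int.mod n prime = 0 then PySem.Int.floordiv n prime else n))

-- ===== PRECONDITION & SPEC =====
-- Pre_ excludes exactly the inputs on which Python A raises ZeroDivisionError: a nonempty arr
-- together with a 0 in primes that is not preceded by a nonzero prime dividing some element.
def Pre_find_div (arr : List Int) (primes : List Int) : Prop :=
  arr = [] ∨ ∀ j < primes.length, primes.getD j 1 = 0 →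
    ∃ i < j, primes.getD i 0 ≠ 0 ∧ ∃ n ∈ arr, PySem.Int.mod n (primes.getD i 0) = 0
instance (arr : List Int) (primes : List Int) : Decidable (Pre_find_div arr primes) := by
  unfold Pre_find_div; infer_instance

def pvWitness_find_div : List Int × List Int := ([6, 7], [5, 2, 3])

def Spec_find_div (arr : List Int) (primes : List Int) (out : Int × List Int) : Prop := out = find_div_alt arr primes
instance (arr : List Int) (primes : List Int) (out : Int × List Int) : Decidable (Spec_find_div arr primes out) := by unfold Spec_find_div; infer_instance

-- ===== CLAIM (what is proved, stated in full; the proofs are below) =====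
def Claim_equal_find_div : Prop := ∀ (arr : List Int) (primes : List Int), Dom_find_div arr primes → Pre_find_div arr primes → Spec_find_div arr primes (find_div arr primes)

-- ===== LEMMAS AND PROOFS =====

-- first index in ps whose entry is nonzero and divides n
def pvFIdx? (n : Int) : List Int → Option Nat
  | [] => none
  | p :: ps => if p ≠ 0 ∧ PySem.Int.mod n p = 0 then some 0 else (pvFIdx? n ps).map (· + 1)

-- first index in ps whose entry is nonzero and divides some element of arr
def pvWIdx? (arr : List Int) : List Int → Option Nat
  | [] => none
  | p :: ps =>
    if p ≠ 0 ∧ arr.any (fun n => PySem.Int.mod n p == 0) then some 0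
    else (pvWIdx? arr ps).map (· + 1)

-- first index in ps whose entry divides some element of arr (A's break index)
def pvAIdx? (arr : List Int) : List Int → Option Nat
  | [] => none
  | p :: ps =>
    if arr.any (fun n => PySem.Int.mod n p == 0) then some 0
    else (pvAIdx? arr ps).map (· + 1)

theorem pvScanB_eq (n : Int) (ps : List Int) (i best : Nat) :
    pvScanB n ps i best = match pvFIdx? n ps with
      | some k => min best (i + k)
      | none => best := by
  induction ps generalizing i with
  | nil => simp [pvScanB, pvFIdx?]
  | cons p ps ih =>
    by_cases hib : i ≥ best
    · by_cases hq : p ≠ 0 ∧ PySem.Int.mod n p = 0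
      · simp [pvScanB, pvFIdx?, hib, hq]
      · rw [pvScanB, if_pos hib, pvFIdx?, if_neg hq]
        cases hf : pvFIdx? n ps with
        | none => simp
        | some k => simp [Nat.min_def]; omega
    · by_cases hq : p ≠ 0 ∧ PySem.Int.mod n p = 0
      · simp [pvScanB, pvFIdx?, hib, hq]
        omega
      · rw [pvScanB, if_neg hib, if_neg hq, ih, pvFIdx?, if_neg hq]
        cases hf : pvFIdx? n ps with
        | none => simp
        | some k => simp; congr 1; omega

theorem pvWIdx_nil (ps : List Int) : pvWIdx? [] ps = none := by
  induction ps with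
  | nil => simp [pvWIdx?]
  | cons p ps ih => simp [pvWIdx?, ih]

-- option-min of the per-element first index and the rest-of-arr first index
theorem pvWIdx_cons (n : Int) (arr ps : List Int) :
    pvWIdx? (n :: arr) ps = match pvFIdx? n ps, pvWIdx? arr ps with
      | none, o => o
      | some k, none => some k
      | some k, some w => some (min k w) := by
  induction ps with
  | nil => simp [pvWIdx?, pvFIdx?]
  | cons p ps ih =>
    by_cases hp : p = 0
    · simp only [pvWIdx?, pvFIdx?, hp]
      simp only [ne_eq, not_true_eq_false, false_and, if_false, ih]
      cases pvFIdx? n ps <;> cases pvWIdx? arr ps <;> simp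
    · by_cases hn : PySem.Int.mod n p = 0
      · have : pvFIdx? n (p :: ps) = some 0 := by simp [pvFIdx?, hp, hn]
        rw [this]
        have : pvWIdx? (n :: arr) (p :: ps) = some 0 := by
          simp [pvWIdx?, hp, List.any_cons, hn]
        rw [this]
        cases pvWIdx? arr (p :: ps) <;> simp
      · have hf : pvFIdx? n (p :: ps) = (pvFIdx? n ps).map (· + 1) := by
          simp [pvFIdx?, hn]
        by_cases ha : arr.any (fun m => PySem.Int.mod m p == 0) = true
        · have h1 : pvWIdx? (n :: arr) (p :: ps) = some 0 := by
            simp [pvWIdx?, hp, List.any_cons, ha]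
          have h2 : pvWIdx? arr (p :: ps) = some 0 := by
            simp [pvWIdx?, hp, ha]
          rw [h1, h2, hf]
          cases pvFIdx? n ps <;> simp
        · have ha' : arr.any (fun m => PySem.Int.mod m p == 0) = false := by simpa using ha
          have h1 : pvWIdx? (n :: arr) (p :: ps) = (pvWIdx? (n :: arr) ps).map (· + 1) := by
            simp [pvWIdx?, List.any_cons, hn, ha']
          have h2 : pvWIdx? arr (p :: ps) = (pvWIdx? arr ps).map (· + 1) := by
            simp [pvWIdx?, ha']
          rw [h1, h2, hf, ih]
          cases pvFIdx? n ps <;> cases pvWIdx? arr ps <;>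
            simp [Nat.min_def] <;> split_ifs <;> omega

theorem pvFoldB_eq (arr primes : List Int) (b : Nat) :
    arr.foldl (fun b n => pvScanB n primes 0 b) b
    = match pvWIdx? arr primes with
      | some w => min b w
      | none => b := by
  induction arr generalizing b with
  | nil => simp [pvWIdx_nil]
  | cons n arr ih =>
    rw [List.foldl_cons, ih, pvScanB_eq, pvWIdx_cons]
    cases pvFIdx? n primes <;> cases pvWIdx? arr primes <;>
      simp [Nat.min_def] <;> split_ifs <;> omega

theorem pvWIdx_lt (arr ps : List Int) (w : Nat) (h : pvWIdx? arr ps = some w) :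
    w < ps.length := by
  induction ps generalizing w with
  | nil => simp [pvWIdx?] at h
  | cons p ps ih =>
    rw [pvWIdx?] at h
    split at h
    · simp at h; simp [List.length_cons]; omega
    · cases hr : pvWIdx? arr ps with
      | none => rw [hr] at h; simp at h
      | some w' =>
        rw [hr] at h; simp at h
        have := ih w' hr
        simp; omega

theorem pvInnerA_go (p : Int) (arr : List Int) (c : Int) (acc : List Int) :
    arr.foldl (pvStepA p) (c, acc)
    = (c + (arr.countP (fun n => PySem.Int.mod n p == 0) : Int),
       acc ++ arr.map (fun n => if PySem.Int.mod n p = 0 then PySem.Int.floordiv n p else n)) := by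
  induction arr generalizing c acc with
  | nil => simp
  | cons x xs ih =>
    rw [List.foldl_cons]
    by_cases h : PySem.Int.mod x p = 0
    · have hs : pvStepA p (c, acc) x = (c + 1, acc ++ [PySem.Int.floordiv x p]) := by
        simp [pvStepA, h]
      rw [hs, ih]
      simp [h, Prod.ext_iff]
      ring
    · have hs : pvStepA p (c, acc) x = (c, acc ++ [x]) := by
        simp [pvStepA, h]
      rw [hs, ih]
      simp [h]

theorem pvInnerA_eq (p : Int) (arr : List Int) :
    pvInnerA p arr
    = ((arr.countP (fun n => PySem.Int.mod n p == 0) : Int),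
       arr.map (fun n => if PySem.Int.mod n p = 0 then PySem.Int.floordiv n p else n)) := by
  simpa using pvInnerA_go p arr 0 []

theorem pv_map_id_of_none (p : Int) (arr : List Int)
    (h : arr.any (fun n => PySem.Int.mod n p == 0) = false) :
    arr.map (fun n => if PySem.Int.mod n p = 0 then PySem.Int.floordiv n p else n) = arr := by
  have h' := List.any_eq_false.mp h
  calc arr.map (fun n => if PySem.Int.mod n p = 0 then PySem.Int.floordiv n p else n)
      = arr.map id := by
        apply List.map_congr_left
        intro n hn
        have := h' n hn
        simp at this
        simp [this]
    _ = arr := List.map_id arr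

-- A's result, characterised by the first index whose entry divides some element
theorem pvA_char (primes arr : List Int) :
    find_div arr primes = match pvAIdx? arr primes with
      | some w =>
        (primes.getD w 0,
         arr.map (fun n => if PySem.Int.mod n (primes.getD w 0) = 0
                           then PySem.Int.floordiv n (primes.getD w 0) else n))
      | none => (0, arr) := by
  induction primes generalizing arr with
  | nil => simp [find_div, pvAIdx?]
  | cons p ps ih =>
    by_cases hAny : arr.any (fun n => PySem.Int.mod n p == 0) = true
    · have hA : pvAIdx? arr (p :: ps) = some 0 := by simp [pvAIdx?, hAny]
      simp [find_div, pvInnerA_eq, hA]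
      intro h
      rcases List.any_eq_true.mp hAny with ⟨n, hn, hd⟩
      exact absurd (show PySem.Int.mod n p = 0 by simpa using hd) (h n hn)
    · have hAny' : arr.any (fun n => PySem.Int.mod n p == 0) = false := by simpa using hAny
      have hcnt : arr.countP (fun n => PySem.Int.mod n p == 0) = 0 := by
        rw [List.countP_eq_zero]
        intro n hn
        have := List.any_eq_false.mp hAny' n hn
        simpa using this
      have hmap := pv_map_id_of_none p arr hAny'
      have hA : pvAIdx? arr (p :: ps) = (pvAIdx? arr ps).map (· + 1) := by
        simp [pvAIdx?, hAny']
      simp only [find_div, pvInnerA_eq, hcnt, hmap, hA]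
      rw [if_neg (by simp)]
      rw [ih arr]
      cases pvAIdx? arr ps <;> simp

-- Pre_ descends past a prime that divides nothing
theorem pvPre_tail (arr : List Int) (p : Int) (ps : List Int)
    (hPre : Pre_find_div arr (p :: ps))
    (hAny' : arr.any (fun n => PySem.Int.mod n p == 0) = false) :
    Pre_find_div arr ps := by
  rcases hPre with hArr | hPre
  · exact Or.inl hArr
  · refine Or.inr ?_
    intro j hj hj0
    rcases hPre (j + 1) (by simpa using Nat.succ_lt_succ hj) (by simpa using hj0) with
      ⟨i, hi, hne, n, hn, hmod⟩
    match i with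
    | 0 =>
      exfalso
      have := List.any_eq_false.mp hAny' n hn
      simp at this hmod
      exact this (by simpa using hmod)
    | i' + 1 =>
      exact ⟨i', by omega, by simpa using hne, n, hn, by simpa using hmod⟩

-- under Pre_, A's break index and B's guarded argmin index coincide
theorem pvIdx_eq (primes arr : List Int) (hPre : Pre_find_div arr primes) :
    pvAIdx? arr primes = pvWIdx? arr primes := by
  induction primes generalizing arr with
  | nil => simp [pvAIdx?, pvWIdx?]
  | cons p ps ih =>
    by_cases hAny : arr.any (fun n => PySem.Int.mod n p == 0) = true
    · have hp : p ≠ 0 := by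
        intro hp0
        rcases hPre with hArr | hPre
        · subst hArr; simp at hAny
        · have := hPre 0 (by simp) (by simpa using hp0)
          omega
      simp [pvAIdx?, pvWIdx?, hAny, hp]
    · have hAny' : arr.any (fun n => PySem.Int.mod n p == 0) = false := by simpa using hAny
      have := ih arr (pvPre_tail arr p ps hPre hAny')
      simp [pvAIdx?, pvWIdx?, hAny', this]

theorem pv_main (primes arr : List Int) (hPre : Pre_find_div arr primes) :
    find_div arr primes = find_div_alt arr primes := by
  rw [pvA_char, pvIdx_eq primes arr hPre]
  unfold find_div_alt
  rw [pvFoldB_eq]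
  cases hW : pvWIdx? arr primes with
  | none => simp
  | some w =>
    have hlt := pvWIdx_lt arr primes w hW
    simp [Nat.min_eq_right hlt.le, Nat.ne_of_lt hlt]

-- ===== VERDICT (by name: the statement is the Claim_ definition above) =====
theorem find_div_spec : Claim_equal_find_div := by
  intro arr primes _ hPre
  exact pv_main primes arr hPre
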